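-- pv_equiv track=rewrite | github.com/xxxVincent-L/Re-DocRED-Prompt | prompt.py | relation_combination
-- ===== SOURCE A (Python) =====
-- def relation_combination(triple):
--
--     new_triple = []
--
--     i = 0
--     while i < len(triple):
--         merged = False
--         j = i + 1
--         while j < len(triple):
--             if triple[i][0] == triple[j][0] and triple[i][1] == triple[j][1]:
--                 if not merged:
--                     temp = [triple[i][2], triple[j][2]]
--                     new_triple.append((triple[i][0], triple[i][1], temp))
--                     merged = True
--                 triple.pop(j)
--             else:
--                 j += 1
--         if not merged:
--             new_triple.append((triple[i][0], triple[i][1],[triple[i][2]]))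
--         i += 1
--     return new_triple
-- ===== SOURCE B (Python) =====
-- def relation_combination(triple):
--     # One pass with an insertion-ordered dict keyed on (head, relation).
--     # Note: A also mutates its argument in place (pops merged duplicates); B does not —
--     # the equivalence claimed is about the return value only.
--     groups = {}
--     for h, r, t in triple:
--         ts = groups.get((h, r))
--         if ts is None:
--             groups[(h, r)] = [t]
--         elif len(ts) < 2:
--             ts.append(t)
--     return [(h, r, ts) for (h, r), ts in groups.items()]
-- ===== Notes on version B (the rewrite author's own statement) =====
-- stated objective: faster
-- what changed: Replaces A's nested while-loops with index arithmetic and in-place pops by a single left-to-right pass over the list that groups via an insertion-ordered dict keyed on the first two components, capping each group at two third-values exactly as A does; A mutates its argument in place, B does not (return value is what is claimed equal).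
import Mathlib
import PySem

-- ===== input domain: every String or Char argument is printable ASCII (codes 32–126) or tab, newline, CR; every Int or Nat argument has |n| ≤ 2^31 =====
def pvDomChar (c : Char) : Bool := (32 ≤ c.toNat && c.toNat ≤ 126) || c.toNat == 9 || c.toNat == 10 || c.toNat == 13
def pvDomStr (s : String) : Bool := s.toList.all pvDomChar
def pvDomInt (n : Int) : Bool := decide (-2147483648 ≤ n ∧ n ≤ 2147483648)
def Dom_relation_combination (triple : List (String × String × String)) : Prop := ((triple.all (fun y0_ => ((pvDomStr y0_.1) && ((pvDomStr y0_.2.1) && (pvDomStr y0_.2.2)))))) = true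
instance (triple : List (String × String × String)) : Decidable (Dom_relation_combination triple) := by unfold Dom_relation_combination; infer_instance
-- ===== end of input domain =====

-- B replaces A's nested scans (with in-place pops) by a single pass over the list with an
-- insertion-ordered dict keyed on the first two components, keeping at most two third values like A.
-- A also mutates its argument in place (pops merged duplicates); B does not: the equivalence proved
-- here is about the return value only.

-- ===== PORT A =====
-- inner 'while j < len(triple)' loop of A over the suffix after position i: pops key-equal
-- entries (recursing), keeps the others (cons), exactly in scan order
def rcInnerA (tri : List (String × String × String)) (ti : String × String × String)
    (merged : Bool) (acc : List (String × String × List String)) :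
    List (String × String × String) × List (String × String × List String) × Bool :=
  match tri with
  | [] => ([], acc, merged)
  | tj :: rest =>
      if ti.1 = tj.1 ∧ ti.2.1 = tj.2.1 then
        rcInnerA rest ti true
          (if merged then acc else acc ++ [(ti.1, ti.2.1, [ti.2.2, tj.2.2])])
      else
        (tj :: (rcInnerA rest ti merged acc).1, (rcInnerA rest ti merged acc).2)

-- the inner loop only pops elements, so the list never grows (needed for rcOuterA's termination)
theorem rcInnerA_length_le (tri : List (String × String × String)) (ti : String × String × String) :
    ∀ (merged : Bool) (acc : List (String × String × List String)),
    (rcInnerA tri ti merged acc).1.length ≤ tri.length := by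
  induction tri with
  | nil => intro merged acc; rw [rcInnerA]
  | cons tj rest ih =>
      intro merged acc
      by_cases hk : ti.1 = tj.1 ∧ ti.2.1 = tj.2.1
      · rw [rcInnerA, if_pos hk]
        exact (ih _ _).trans (Nat.le_succ _)
      · rw [rcInnerA, if_neg hk]
        exact Nat.succ_le_succ (ih _ _)

-- outer 'while i < len(triple)' loop of A: the list before position i has been fully processed,
-- the suffix from position i on is the argument
def rcOuterA (tri : List (String × String × String))
    (acc : List (String × String × List String)) : List (String × String × List String) :=
  match tri with
  | [] => acc
  | ti :: rest =>
      rcOuterA (rcInnerA rest ti false acc).1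
        (if (rcInnerA rest ti false acc).2.2 then (rcInnerA rest ti false acc).2.1
         else (rcInnerA rest ti false acc).2.1 ++ [(ti.1, ti.2.1, [ti.2.2])])
termination_by tri.length
decreasing_by
  exact Nat.lt_succ_of_le (rcInnerA_length_le rest ti false acc)

def relation_combination (triple : List (String × String × String)) : List (String × String × List String) :=
  rcOuterA triple []

-- ===== PORT B =====
-- the grouping key (h, r) of a triple
def rcKey (x : String × String × String) : String × String := (x.1, x.2.1)

-- one step of B's single pass: start a group, or append its third value while the group holds < 2
def rcStepB (d : PySem.Dict (String × String) (List String)) (x : String × String × String) :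
    PySem.Dict (String × String) (List String) :=
  match d.get? (rcKey x) with
  | none => d.insert (rcKey x) [x.2.2]
  | some ts => if ts.length < 2 then d.insert (rcKey x) (ts ++ [x.2.2]) else d

def relation_combination_alt (triple : List (String × String × String)) : List (String × String × List String) :=
  ((triple.foldl rcStepB PySem.Dict.empty).items).map (fun p => (p.1.1, p.1.2, p.2))

-- ===== PRECONDITION & SPEC =====
def Spec_relation_combination (triple : List (String × String × String)) (out : List (String × String × List String)) : Prop := out = relation_combination_alt triple
instance (triple : List (String × String × String)) (out : List (String × String × List String)) : Decidable (Spec_relation_combination triple out) := by unfold Spec_relation_combination; infer_instance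

-- ===== CLAIM (what is proved, stated in full; the proofs are below) =====
def Claim_equal_relation_combination : Prop := ∀ (triple : List (String × String × String)), Dom_relation_combination triple → Spec_relation_combination triple (relation_combination triple)

-- ===== LEMMAS AND PROOFS =====

-- canonical form both sides are reduced to: keys in first-occurrence order, first ≤ 2 values each
def rcCanon (xs : List (String × String × String)) : List (String × String × List String) :=
  (PySem.Set.ofList (xs.map rcKey)).map
    (fun k => (k.1, k.2, (((xs.filter (fun y => rcKey y == k)).map (fun y => y.2.2)).take 2)))

theorem rcKey_beq (ti x : String × String × String) :
    (rcKey x == rcKey ti) = decide (ti.1 = x.1 ∧ ti.2.1 = x.2.1) := by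
  simp [rcKey, Bool.decide_and, beq_eq_decide, eq_comm]

theorem rcInnerA_spec (rest : List (String × String × String)) :
    ∀ (ti : String × String × String)
      (merged : Bool) (acc : List (String × String × List String)),
    rcInnerA rest ti merged acc =
      (rest.filter (fun y => !(rcKey y == rcKey ti)),
       acc ++ (if merged then [] else
         (((rest.filter (fun y => rcKey y == rcKey ti)).map (fun y => y.2.2)).take 1).map
           (fun w => (ti.1, ti.2.1, [ti.2.2, w]))),
       merged || rest.any (fun y => rcKey y == rcKey ti)) := by
  induction rest with
  | nil => intro ti merged acc; rw [rcInnerA]; simp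
  | cons x rest ih =>
      intro ti merged acc
      by_cases hk : ti.1 = x.1 ∧ ti.2.1 = x.2.1
      · have hkb : (rcKey x == rcKey ti) = true := by rw [rcKey_beq]; exact decide_eq_true hk
        rw [rcInnerA, if_pos hk]
        rw [ih ti true (if merged then acc else acc ++ [(ti.1, ti.2.1, [ti.2.2, x.2.2])])]
        simp [hkb]
        cases merged <;> simp
      · have hkb : (rcKey x == rcKey ti) = false := by rw [rcKey_beq]; exact decide_eq_false hk
        rw [rcInnerA, if_neg hk]
        rw [ih ti merged acc]
        simp [hkb]

-- group-wise recursion A's outer loop computes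
def gA : List (String × String × String) → List (String × String × List String)
  | [] => []
  | x :: rest =>
      (x.1, x.2.1, x.2.2 :: ((rest.filter (fun y => rcKey y == rcKey x)).map (fun y => y.2.2)).take 1)
        :: gA (rest.filter (fun y => !(rcKey y == rcKey x)))
termination_by l => l.length
decreasing_by
  rw [List.length_unattach, List.length_cons]
  exact Nat.lt_succ_of_le ((List.length_filter_le _ _).trans (Nat.le_of_eq List.length_attach))

theorem rcOuterA_gA : ∀ (n : Nat) (rest : List (String × String × String))
    (acc : List (String × String × List String)), rest.length ≤ n →
    rcOuterA rest acc = acc ++ gA rest := by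
  intro n
  induction n with
  | zero =>
      intro rest acc hn
      have : rest = [] := List.eq_nil_of_length_eq_zero (Nat.le_zero.1 hn)
      subst this
      rw [rcOuterA, gA]; simp
  | succ n ih =>
      intro rest acc hn
      match rest with
      | [] => rw [rcOuterA, gA]; simp
      | x :: rest =>
        rw [rcOuterA]
        rw [rcInnerA_spec rest x false acc]
        rw [ih (rest.filter (fun y => !(rcKey y == rcKey x))) _
              (le_trans (List.length_filter_le _ _) (Nat.le_of_succ_le_succ hn))]
        conv_rhs => rw [gA]
        cases hfl : rest.filter (fun y => rcKey y == rcKey x) with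
        | nil =>
            have hany : rest.any (fun y => rcKey y == rcKey x) = false := by
              rw [List.any_eq_false]
              intro y hy
              have := List.filter_eq_nil_iff.1 hfl y hy
              simpa using this
            simp [hany]
        | cons a l =>
            have ha : a ∈ rest.filter (fun y => rcKey y == rcKey x) := by
              rw [hfl]; exact List.mem_cons_self
            have hmem := List.mem_filter.1 ha
            have hany : rest.any (fun y => rcKey y == rcKey x) = true :=
              List.any_eq_true.2 ⟨a, hmem.1, hmem.2⟩
            simp [hany]

-- dedup commutes with filter
theorem setOfList_filter {α : Type} [BEq α] [LawfulBEq α] (l : List α) (p : α → Bool) :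
    (PySem.Set.ofList l).filter p = PySem.Set.ofList (l.filter p) := by
  induction l with
  | nil => rfl
  | cons y l ih =>
      by_cases hp : p y = true
      · conv_rhs => rw [List.filter_cons_of_pos hp, PySem.Set.ofList_cons]
        rw [PySem.Set.ofList_cons, List.filter_cons_of_pos hp, ← ih]
        simp only [PySem.Set.discard, List.filter_filter]
        congr 1
        apply List.filter_congr
        intro a _
        rw [Bool.and_comm]
      · have hp' : p y = false := by simpa using hp
        conv_rhs => rw [List.filter_cons_of_neg (by simp [hp']), ← ih]
        rw [PySem.Set.ofList_cons, List.filter_cons_of_neg (by simp [hp'])]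
        simp only [PySem.Set.discard, List.filter_filter]
        apply List.filter_congr
        intro a _
        by_cases ha : (a == y) = true
        · have : a = y := eq_of_beq ha
          subst this
          simp [hp']
        · simp [Bool.eq_false_iff.2 ha]

theorem gA_canon : ∀ (n : Nat) (xs : List (String × String × String)), xs.length ≤ n →
    gA xs = rcCanon xs := by
  intro n
  induction n with
  | zero =>
      intro xs hn
      have : xs = [] := List.eq_nil_of_length_eq_zero (Nat.le_zero.1 hn)
      subst this
      rw [gA]
      rfl
  | succ n ih =>
      intro xs hn
      match xs with
      | [] => rw [gA]; rfl
      | x :: rest =>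
        have hofl : PySem.Set.ofList ((x :: rest).map rcKey) =
            rcKey x :: PySem.Set.ofList ((rest.filter (fun y => !(rcKey y == rcKey x))).map rcKey) := by
          rw [List.map_cons, PySem.Set.ofList_cons]
          simp only [PySem.Set.discard]
          rw [setOfList_filter, List.filter_map]
          rfl
        rw [gA]
        unfold rcCanon
        rw [hofl, List.map_cons]
        congr 1
        · rw [List.filter_cons_of_pos (by simp)]
          simp [rcKey]
        · rw [ih (rest.filter (fun y => !(rcKey y == rcKey x)))
              (le_trans (List.length_filter_le _ _) (Nat.le_of_succ_le_succ hn))]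
          unfold rcCanon
          apply List.map_congr_left
          intro k hk
          have hkx : (k == rcKey x) = false := by
            obtain ⟨y, hy, rfl⟩ := List.mem_map.1 ((PySem.Set.mem_ofList _ _).1 hk)
            simpa using (List.mem_filter.1 hy).2
          have hxk : (rcKey x == k) = false := by
            apply Bool.eq_false_iff.2
            intro h
            rw [← eq_of_beq h] at hkx
            simp at hkx
          rw [List.filter_cons_of_neg (by simp [hxk]), List.filter_filter]
          have hfe : List.filter (fun a => rcKey a == k && !(rcKey a == rcKey x)) rest =
              List.filter (fun y => rcKey y == k) rest := by
            apply List.filter_congr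
            intro y _
            by_cases hyk : (rcKey y == k) = true
            · have hyx : (rcKey y == rcKey x) = false := by rw [eq_of_beq hyk]; exact hkx
              simp [hyk, hyx]
            · simp [Bool.eq_false_iff.2 hyk]
          rw [hfe]

theorem rcStepB_keys (d : PySem.Dict (String × String) (List String)) (x : String × String × String) :
    (rcStepB d x).keys = PySem.Set.add d.keys (rcKey x) := by
  cases hg : d.get? (rcKey x) with
  | none =>
      have hc : d.contains (rcKey x) = false := by
        rw [PySem.Dict.contains_eq_isSome_get?, hg]; rfl
      have hnm : rcKey x ∉ d.keys := fun hm =>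
        by rw [(PySem.Dict.contains_iff_mem_keys _ _).2 hm] at hc; cases hc
      have hstep : rcStepB d x = d.insert (rcKey x) [x.2.2] := by rw [rcStepB, hg]
      rw [hstep, PySem.Dict.keys_insert_of_not_contains d _ hc, PySem.Set.add_of_not_mem hnm]
  | some ts =>
      have hc : d.contains (rcKey x) = true := by
        rw [PySem.Dict.contains_eq_isSome_get?, hg]; rfl
      have hm : rcKey x ∈ d.keys := (PySem.Dict.contains_iff_mem_keys _ _).1 hc
      by_cases hlen : ts.length < 2
      · have hstep : rcStepB d x = d.insert (rcKey x) (ts ++ [x.2.2]) := by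
          rw [rcStepB, hg]; exact if_pos hlen
        rw [hstep, PySem.Dict.keys_insert_of_contains d _ hc, PySem.Set.add_of_mem hm]
      · have hstep : rcStepB d x = d := by rw [rcStepB, hg]; exact if_neg hlen
        rw [hstep, PySem.Set.add_of_mem hm]

theorem foldB_keys (xs : List (String × String × String)) (d : PySem.Dict (String × String) (List String)) :
    (List.foldl rcStepB d xs).keys = PySem.Set.update d.keys (xs.map rcKey) := by
  induction xs generalizing d with
  | nil => simp [PySem.Set.update_nil]
  | cons x xs ih =>
      rw [List.foldl_cons, ih, rcStepB_keys, List.map_cons, PySem.Set.update_cons]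

theorem foldB_getD (xs : List (String × String × String)) :
    ∀ (d : PySem.Dict (String × String) (List String)) (k : String × String),
    (List.foldl rcStepB d xs).getD k [] =
      d.getD k [] ++ (((xs.filter (fun y => rcKey y == k)).map (fun y => y.2.2)).take (2 - (d.getD k []).length)) := by
  induction xs with
  | nil => intro d k; simp
  | cons x xs ih =>
      intro d k
      rw [List.foldl_cons]
      by_cases hk : (rcKey x == k) = true
      · have hkk : k = rcKey x := (eq_of_beq hk).symm
        subst hkk
        rw [List.filter_cons_of_pos (by simp)]
        cases hg : d.get? (rcKey x) with
        | none =>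
            have hd : d.getD (rcKey x) [] = [] := by
              rw [PySem.Dict.getD_eq_get?_getD, hg]; rfl
            have hstep : rcStepB d x = d.insert (rcKey x) [x.2.2] := by rw [rcStepB, hg]
            rw [hstep, ih, PySem.Dict.getD_insert_self, hd]
            simp
        | some ts =>
            have hd : d.getD (rcKey x) [] = ts := by
              rw [PySem.Dict.getD_eq_get?_getD, hg]; rfl
            by_cases hlen : ts.length < 2
            · have hstep : rcStepB d x = d.insert (rcKey x) (ts ++ [x.2.2]) := by
                rw [rcStepB, hg]; exact if_pos hlen
              rw [hstep, ih, PySem.Dict.getD_insert_self, hd]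
              have h2 : 2 - ts.length = (2 - (ts ++ [x.2.2]).length) + 1 := by
                simp; omega
              rw [h2, List.map_cons, List.take_succ_cons]
              simp
            · have hstep : rcStepB d x = d := by rw [rcStepB, hg]; exact if_neg hlen
              rw [hstep, ih, hd]
              have h2 : 2 - ts.length = 0 := by omega
              rw [h2]
              simp
      · have hne : k ≠ rcKey x := by
          intro h; subst h; simp at hk
        have hstep : (rcStepB d x).getD k [] = d.getD k [] := by
          cases hg : d.get? (rcKey x) with
          | none =>
              have hstep : rcStepB d x = d.insert (rcKey x) [x.2.2] := by rw [rcStepB, hg]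
              rw [hstep]
              exact PySem.Dict.getD_insert_of_ne d _ _ hne
          | some ts =>
              by_cases hlen : ts.length < 2
              · have hstep : rcStepB d x = d.insert (rcKey x) (ts ++ [x.2.2]) := by
                  rw [rcStepB, hg]; exact if_pos hlen
                rw [hstep]
                exact PySem.Dict.getD_insert_of_ne d _ _ hne
              · have hstep : rcStepB d x = d := by rw [rcStepB, hg]; exact if_neg hlen
                rw [hstep]
        rw [List.filter_cons_of_neg (by simpa using hk), ih, hstep]

theorem alt_canon (xs : List (String × String × String)) : relation_combination_alt xs = rcCanon xs := by
  unfold relation_combination_alt rcCanon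
  have hkeys := foldB_keys xs PySem.Dict.empty
  have hnil : (PySem.Dict.empty : PySem.Dict (String × String) (List String)).keys = [] := rfl
  rw [hnil, PySem.Set.update_nil_left] at hkeys
  have hnd : (List.foldl rcStepB PySem.Dict.empty xs).keys.Nodup := by
    rw [hkeys]; exact PySem.Set.nodup_ofList _
  rw [PySem.Dict.items_eq_map_keys _ hnd ([] : List String), hkeys, List.map_map]
  apply List.map_congr_left
  intro k _
  simp only [Function.comp]
  rw [foldB_getD]
  have : (PySem.Dict.empty : PySem.Dict (String × String) (List String)).getD k [] = [] := rfl
  rw [this]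
  simp

-- ===== VERDICT (by name: the statement is the Claim_ definition above) =====
theorem relation_combination_spec : Claim_equal_relation_combination := by
  intro triple _
  show relation_combination triple = relation_combination_alt triple
  have hA : relation_combination triple = gA triple := by
    have := rcOuterA_gA triple.length triple [] (le_refl _)
    simpa [relation_combination] using this
  rw [hA, gA_canon triple.length triple (le_refl _), alt_canon]
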